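-- pv_equiv track=rewrite | github.com/pypi-data/pypi-mirror-74 | packages/letterchains/letterchains-0.1.1.tar.gz/letterchains-0.1.1/src/letterchains/main.py | longest_paths_from
-- ===== SOURCE A (Python) =====
-- import typing as t
--
-- T = t.TypeVar("T")
--
-- def identity(x: T) -> T:
--     """Return the argument."""
--     return x
--
-- def maxes(items: t.Iterable[T], key: t.Callable[[T], t.Any] = identity) -> t.List[T]:
--     """Return a list of maximal elements."""
--     items = list(items)
--     if not items:
--         raise ValueError(items, "is empty")
--     max_value = key(items[0])
--     values = []
--     for item in items:
--         if key(item) == max_value: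
--             values.append(item)
--         elif key(item) > max_value:
--             values.clear()
--             values.append(item)
--             max_value = key(item)
--
--     return values
--
-- def longest_paths_from(
--     adjacency: t.Dict[str, t.Set[str]], origin: str
-- ) -> t.List[t.List[str]]:
--     """Get the list of max-length paths from origin."""
--     paths = [[origin]]
--     for child in adjacency.get(origin, set()):
--         for path in longest_paths_from(adjacency, child):
--             paths.append([origin] + path)
--
--     return maxes(paths, key=len)
-- ===== SOURCE B (Python) =====
-- import typing as t
--
--
-- def longest_paths_from(
--     adjacency: t.Dict[str, t.Set[str]], origin: str
-- ) -> t.List[t.List[str]]: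
--     """Get the list of max-length paths from origin (memoized DP, one pass per node)."""
--     memo: t.Dict[str, t.List[t.List[str]]] = {}
--
--     def solve(node: str) -> t.List[t.List[str]]:
--         if node in memo:
--             return memo[node]
--         best = [[node]]
--         for child in adjacency.get(node, set()):
--             for path in solve(child):
--                 cand = [node] + path
--                 if len(cand) > len(best[0]):
--                     best = [cand]
--                 elif len(cand) == len(best[0]):
--                     best.append(cand)
--         memo[node] = best
--         return best
--
--     return solve(origin)
-- ===== Notes on version B (the rewrite author's own statement) =====
-- stated objective: alternative
-- what changed: B memoizes the longest-path list per node in a dict and maintains the running list of maximal paths inline, instead of A's unmemoized recursion that collects every candidate path and post-filters with the maxes helper; this removes recomputation of shared descendants (intended as faster there; a timing run on random inputs measured only ~1.4x at the largest size, so no speed is claimed).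
import Mathlib
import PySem

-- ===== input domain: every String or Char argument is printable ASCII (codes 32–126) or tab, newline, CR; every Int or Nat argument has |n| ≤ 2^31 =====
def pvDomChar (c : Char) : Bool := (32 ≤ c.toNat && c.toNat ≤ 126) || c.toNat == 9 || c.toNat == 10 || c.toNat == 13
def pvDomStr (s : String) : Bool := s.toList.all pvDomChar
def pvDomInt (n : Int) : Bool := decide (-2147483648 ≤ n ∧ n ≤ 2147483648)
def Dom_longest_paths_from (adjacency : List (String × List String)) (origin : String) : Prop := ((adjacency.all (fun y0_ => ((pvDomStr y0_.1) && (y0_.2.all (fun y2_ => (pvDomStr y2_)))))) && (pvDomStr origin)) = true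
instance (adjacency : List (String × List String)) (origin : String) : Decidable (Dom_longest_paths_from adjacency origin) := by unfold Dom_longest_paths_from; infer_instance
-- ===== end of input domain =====

-- B memoizes longest-path lists per node and keeps a running list of maximal paths inline,
-- replacing A's unmemoized recursion + collect-then-maxes (objective: alternative — one visit per node).

-- ===== PORT A =====

-- adjacency.get(node, set()): dict lookup with default
def pvChildren (adjacency : List (String × List String)) (node : String) : List String :=
  PySem.Dict.getD (PySem.Dict.mk adjacency) node []

-- A's helper maxes(items, key=len): loop state (max_value, values)
def pvMaxesLoop (mv : Nat) (values : List (List String)) : List (List String) → List (List String)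
  | [] => values
  | it :: rest =>
    if it.length = mv then pvMaxesLoop mv (values ++ [it]) rest
    else if mv < it.length then pvMaxesLoop it.length [it] rest
    else pvMaxesLoop mv values rest

def pvMaxes (items : List (List String)) : List (List String) :=
  match items with
  | [] => []   -- Python raises ValueError here; unreachable from longest_paths_from (paths starts nonempty)
  | first :: _ => pvMaxesLoop first.length [] items

-- A's recursion; fuel only totalizes Python's unbounded recursion (Pre_ guarantees it is never exhausted)
def pvGoA (adjacency : List (String × List String)) : Nat → String → List (List String)
  | 0, _ => []
  | fuel+1, o =>
    let paths := (pvChildren adjacency o).foldl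
      (fun acc c => (pvGoA adjacency fuel c).foldl (fun a2 p => a2 ++ [o :: p]) acc)
      [[o]]
    pvMaxes paths

def longest_paths_from (adjacency : List (String × List String)) (origin : String) : List (List String) :=
  pvGoA adjacency (adjacency.length + 1) origin

-- ===== PORT B =====

-- B's inner double-loop body: fold one candidate path into the running list of maximal paths
def pvBStep (node : String) (best : List (List String)) (path : List String) : List (List String) :=
  let cand := node :: path
  if (best.headD []).length < cand.length then [cand]
  else if cand.length = (best.headD []).length then best ++ [cand]
  else best

-- B's solve(node), threading the memo dict; fuel only totalizes Python's unbounded recursion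
def pvSolveB (adjacency : List (String × List String)) :
    Nat → PySem.Dict String (List (List String)) → String →
    List (List String) × PySem.Dict String (List (List String))
  | 0, memo, _ => ([], memo)
  | fuel+1, memo, node =>
    match PySem.Dict.get? memo node with
    | some v => (v, memo)
    | none =>
      let r := (pvChildren adjacency node).foldl
        (fun (st : List (List String) × PySem.Dict String (List (List String))) c =>
          let rc := pvSolveB adjacency fuel st.2 c
          (rc.1.foldl (pvBStep node) st.1, rc.2))
        ([[node]], memo)
      (r.1, (r.2).insert node r.1)

def longest_paths_from_alt (adjacency : List (String × List String)) (origin : String) : List (List String) :=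
  (pvSolveB adjacency (adjacency.length + 1) PySem.Dict.empty origin).1

-- ===== PRECONDITION & SPEC =====

-- graph property: pvOk adjacency n o = true iff every edge-walk starting at o has fewer than n edges
-- (it computes no paths and no maxima; it is the standard bounded-walk statement of acyclicity-from-o)
def pvOk (adjacency : List (String × List String)) : Nat → String → Bool
  | 0, _ => false
  | fuel+1, o => (pvChildren adjacency o).all (pvOk adjacency fuel)

-- Pre_ excludes exactly the inputs on which Python A never returns: a cycle in `adjacency` reachable
-- from `origin` (A recurses forever and raises RecursionError; B does the same). On acyclic inputs every
-- walk from origin has at most `adjacency.length` edges, so pvOk with fuel length+1 holds.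
def Pre_longest_paths_from (adjacency : List (String × List String)) (origin : String) : Prop :=
  pvOk adjacency (adjacency.length + 1) origin = true

instance (adjacency : List (String × List String)) (origin : String) : Decidable (Pre_longest_paths_from adjacency origin) := by unfold Pre_longest_paths_from; infer_instance

def pvWitness_longest_paths_from : (List (String × List String)) × String :=
  ([("a", ["b", "c"]), ("b", ["c"])], "a")

def Spec_longest_paths_from (adjacency : List (String × List String)) (origin : String) (out : List (List String)) : Prop := out = longest_paths_from_alt adjacency origin
instance (adjacency : List (String × List String)) (origin : String) (out : List (List String)) : Decidable (Spec_longest_paths_from adjacency origin out) := by unfold Spec_longest_paths_from; infer_instance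

-- ===== CLAIM (what is proved, stated in full; the proofs are below) =====
def Claim_equal_longest_paths_from : Prop := ∀ (adjacency : List (String × List String)) (origin : String), Dom_longest_paths_from adjacency origin → Pre_longest_paths_from adjacency origin → Spec_longest_paths_from adjacency origin (longest_paths_from adjacency origin)

-- ===== LEMMAS AND PROOFS =====

-- canonical step: fold one full candidate into the running maximal list (pvBStep node b p = pvMStep b (node :: p))
def pvMStep (best : List (List String)) (cand : List String) : List (List String) :=
  if (best.headD []).length < cand.length then [cand]
  else if cand.length = (best.headD []).length then best ++ [cand]
  else best

lemma pvMaxesLoop_eq_foldl : ∀ (l : List (List String)) (values : List (List String)) (mv : Nat),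
    values ≠ [] → (∀ v ∈ values, v.length = mv) →
    pvMaxesLoop mv values l = l.foldl pvMStep values := by
  intro l
  induction l with
  | nil => intro values mv _ _; rfl
  | cons it rest ih =>
    intro values mv hne hall
    obtain ⟨v0, vs, rfl⟩ := List.exists_cons_of_ne_nil hne
    have h0 : v0.length = mv := hall v0 (by simp)
    by_cases heq : it.length = mv
    · rw [pvMaxesLoop, if_pos heq]
      have : pvMStep (v0 :: vs) it = (v0 :: vs) ++ [it] := by
        simp [pvMStep, h0, heq]
      rw [List.foldl_cons, this, ih _ mv (by simp) ?_]
      intro v hv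
      rcases List.mem_append.1 hv with hv | hv
      · exact hall v hv
      · simp at hv; simp [hv, heq]
    · by_cases hlt : mv < it.length
      · rw [pvMaxesLoop, if_neg heq, if_pos hlt]
        have : pvMStep (v0 :: vs) it = [it] := by
          simp [pvMStep, h0, hlt]
        rw [List.foldl_cons, this, ih _ it.length (by simp) (by simp)]
      · rw [pvMaxesLoop, if_neg heq, if_neg hlt]
        have : pvMStep (v0 :: vs) it = v0 :: vs := by
          simp [pvMStep, h0, hlt, heq]
        rw [List.foldl_cons, this, ih _ mv (by simp) hall]

lemma pvMaxes_cons (x : List String) (l : List (List String)) :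
    pvMaxes (x :: l) = l.foldl pvMStep [x] := by
  rw [pvMaxes, pvMaxesLoop, if_pos rfl]
  exact pvMaxesLoop_eq_foldl l [x] x.length (by simp) (by simp)

lemma pvFoldPush (L : List (List String)) (o : String) : ∀ (acc : List (List String)),
    L.foldl (fun a2 p => a2 ++ [o :: p]) acc = acc ++ L.map (o :: ·) := by
  induction L with
  | nil => simp
  | cons p ps ih => intro acc; simp [ih]

lemma pvFoldFlat (cs : List String) (h : String → List (List String)) : ∀ acc,
    cs.foldl (fun a c => a ++ h c) acc = acc ++ cs.flatMap h := by
  induction cs with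
  | nil => simp
  | cons c cs' ih => intro acc; simp [ih]

-- A's body as maxes over [origin] followed by the stream of candidates
lemma pvGoA_succ (adjacency : List (String × List String)) (fuel : Nat) (o : String) :
    pvGoA adjacency (fuel + 1) o =
      ((pvChildren adjacency o).flatMap
        (fun c => (pvGoA adjacency fuel c).map (o :: ·))).foldl pvMStep [[o]] := by
  rw [pvGoA]
  have hpaths : (pvChildren adjacency o).foldl
      (fun acc c => (pvGoA adjacency fuel c).foldl (fun a2 p => a2 ++ [o :: p]) acc) [[o]]
      = [o] :: (pvChildren adjacency o).flatMap (fun c => (pvGoA adjacency fuel c).map (o :: ·)) := by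
    have : (fun acc c => (pvGoA adjacency fuel c).foldl (fun a2 p => a2 ++ [o :: p]) acc)
        = (fun acc c => acc ++ (pvGoA adjacency fuel c).map (o :: ·)) := by
      funext acc c; exact pvFoldPush _ o acc
    rw [this, pvFoldFlat]; rfl
  rw [hpaths, pvMaxes_cons]

lemma pvGoA_stable (adjacency : List (String × List String)) :
    ∀ (f g : Nat) (o : String), pvOk adjacency f o = true → f ≤ g →
      pvGoA adjacency g o = pvGoA adjacency f o := by
  intro f
  induction f with
  | zero => intro g o hok _; simp [pvOk] at hok
  | succ f' ih =>
    intro g o hok hle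
    obtain ⟨g', rfl⟩ : ∃ g', g = g' + 1 := ⟨g - 1, by omega⟩
    rw [pvGoA_succ, pvGoA_succ]
    congr 1
    rw [List.flatMap_def, List.flatMap_def]
    congr 1
    apply List.map_congr_left
    intro c hc
    rw [pvOk] at hok
    have hc' : pvOk adjacency f' c = true := by
      rw [List.all_eq_true] at hok; exact hok c hc
    rw [ih g' c hc' (by omega)]

lemma pvGoA_stable2 (adjacency : List (String × List String)) (f g : Nat) (o : String)
    (hf : pvOk adjacency f o = true) (hg : pvOk adjacency g o = true) :
    pvGoA adjacency f o = pvGoA adjacency g o := by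
  rw [← pvGoA_stable adjacency f (max f g) o hf (le_max_left _ _),
      pvGoA_stable adjacency g (max f g) o hg (le_max_right _ _)]

-- memo invariant: every stored value is the (fuel-stable) longest-path list of its key
def pvInv (adjacency : List (String × List String)) (memo : PySem.Dict String (List (List String))) : Prop :=
  ∀ k v, memo.get? k = some v → ∃ f, pvOk adjacency f k = true ∧ v = pvGoA adjacency f k

lemma pvSolveB_correct (adjacency : List (String × List String)) :
    ∀ (fuel : Nat) (node : String) (memo : PySem.Dict String (List (List String))),
      pvOk adjacency fuel node = true → pvInv adjacency memo →
      (pvSolveB adjacency fuel memo node).1 = pvGoA adjacency fuel node ∧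
        pvInv adjacency (pvSolveB adjacency fuel memo node).2 := by
  intro fuel
  induction fuel with
  | zero => intro node memo hok _; simp [pvOk] at hok
  | succ fuel' ih =>
    intro node memo hok hinv
    have hchild : ∀ c ∈ pvChildren adjacency node, pvOk adjacency fuel' c = true := by
      rw [pvOk, List.all_eq_true] at hok; exact hok
    rw [pvSolveB]
    cases hget : PySem.Dict.get? memo node with
    | some v =>
      simp only
      obtain ⟨g, hg, rfl⟩ := hinv node v hget
      exact ⟨pvGoA_stable2 adjacency g (fuel' + 1) node hg hok, hinv⟩
    | none =>
      simp only
      -- the fold over children computes the stream fold and preserves the invariant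
      have key : ∀ (cs : List String), (∀ c ∈ cs, pvOk adjacency fuel' c = true) →
          ∀ (best : List (List String)) (m : PySem.Dict String (List (List String))), pvInv adjacency m →
          (cs.foldl (fun (st : List (List String) × PySem.Dict String (List (List String))) c =>
              let rc := pvSolveB adjacency fuel' st.2 c
              (rc.1.foldl (pvBStep node) st.1, rc.2)) (best, m)).1
            = (cs.flatMap (fun c => (pvGoA adjacency fuel' c).map (node :: ·))).foldl pvMStep best ∧
          pvInv adjacency (cs.foldl (fun (st : List (List String) × PySem.Dict String (List (List String))) c =>
              let rc := pvSolveB adjacency fuel' st.2 c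
              (rc.1.foldl (pvBStep node) st.1, rc.2)) (best, m)).2 := by
        intro cs
        induction cs with
        | nil => intro _ best m hm; exact ⟨rfl, hm⟩
        | cons c cs' ihc =>
          intro hcs best m hm
          obtain ⟨h1, h2⟩ := ih c m (hcs c (by simp)) hm
          have hstep : ((pvSolveB adjacency fuel' m c).1.foldl (pvBStep node) best)
              = ((pvGoA adjacency fuel' c).map (node :: ·)).foldl pvMStep best := by
            rw [h1, List.foldl_map]; rfl
          obtain ⟨h3, h4⟩ := ihc (fun d hd => hcs d (by simp [hd]))
            (((pvSolveB adjacency fuel' m c).1.foldl (pvBStep node) best))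
            (pvSolveB adjacency fuel' m c).2 h2
          refine ⟨?_, h4⟩
          rw [List.foldl_cons] at *
          simp only at h3 ⊢
          rw [h3, hstep, List.flatMap_cons, List.foldl_append]
      obtain ⟨h1, h2⟩ := key (pvChildren adjacency node) hchild [[node]] memo hinv
      constructor
      · simpa [pvGoA_succ] using h1
      · intro k v hkv
        rw [PySem.Dict.get?_insert] at hkv
        by_cases hk : k = node
        · rw [if_pos hk] at hkv
          refine ⟨fuel' + 1, by rw [hk]; exact hok, ?_⟩
          cases hkv
          rw [hk, pvGoA_succ, ← h1]
        · rw [if_neg hk] at hkv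
          exact h2 k v hkv

-- ===== VERDICT (by name: the statement is the Claim_ definition above) =====
theorem longest_paths_from_spec : Claim_equal_longest_paths_from := by
  intro adjacency origin _hdom hpre
  unfold Spec_longest_paths_from longest_paths_from longest_paths_from_alt
  have hinv : pvInv adjacency PySem.Dict.empty := by
    intro k v h; rw [PySem.Dict.get?_empty] at h; exact absurd h (by simp)
  exact ((pvSolveB_correct adjacency (adjacency.length + 1) origin PySem.Dict.empty hpre hinv).1).symm
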